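-- pv_equiv track=rewrite | github.com/yanmingyu92/py4csr | py4csr/plotting/comprehensive_clinical_plots.py | parse_sas_parameter_string
-- ===== SOURCE A (Python) =====
-- from typing import Dict, List, Optional, Union, Tuple, Any, Callable
--
-- def parse_sas_parameter_string(param_string: str, delimiter: str = '~') -> List[Dict[str, str]]:
--     """
--     Parse SAS parameter strings (e.g., ValColSymLtype)
--
--     Parameters
--     ----------
--     param_string : str
--         SAS parameter string
--     delimiter : str, default '~'
--         Primary delimiter
--
--     Returns
--     -------
--     List[Dict[str, str]]
--         Parsed parameter components
--     """
--     if not param_string: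
--         return []
--
--     components = []
--     items = param_string.split(delimiter)
--
--     for item in items:
--         if '|' in item:
--             parts = item.split('|')
--             component = {}
--             # Common SAS parameter structure: value|color|symbol|line|position
--             if len(parts) >= 1:
--                 component['value'] = parts[0]
--             if len(parts) >= 2:
--                 component['color'] = parts[1]
--             if len(parts) >= 3:
--                 component['symbol'] = parts[2]
--             if len(parts) >= 4:
--                 component['line'] = parts[3]
--             if len(parts) >= 5:
--                 component['position'] = parts[4]
--             components.append(component)
--         else:
--             components.append({'value': item})
--
--     return components
-- ===== SOURCE B (Python) =====
-- def _items(s, delimiter):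
--     # peel pieces off the front with partition instead of splitting all at once
--     out = []
--     while True:
--         head, found, tail = s.partition(delimiter)
--         out.append(head)
--         if not found:
--             return out
--         s = tail
--
--
-- def _component(item):
--     # consume the item key by key with partition; stop at the first missing '|'
--     comp = {}
--     for key in ('value', 'color', 'symbol', 'line', 'position'):
--         part, bar, item = item.partition('|')
--         comp[key] = part
--         if not bar:
--             break
--     return comp
--
--
-- def parse_sas_parameter_string(param_string, delimiter='~'):
--     if not param_string:
--         return []
--     return [_component(item) for item in _items(param_string, delimiter)]
-- ===== Notes on version B (the rewrite author's own statement) =====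
-- stated objective: alternative
-- what changed: B never calls split: it peels items off the front of the string with repeated str.partition, and builds each component by consuming the item key-by-key with partition and an early break, instead of A's split-everything plus '|'-branch plus five len(parts) checks.
import Mathlib
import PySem

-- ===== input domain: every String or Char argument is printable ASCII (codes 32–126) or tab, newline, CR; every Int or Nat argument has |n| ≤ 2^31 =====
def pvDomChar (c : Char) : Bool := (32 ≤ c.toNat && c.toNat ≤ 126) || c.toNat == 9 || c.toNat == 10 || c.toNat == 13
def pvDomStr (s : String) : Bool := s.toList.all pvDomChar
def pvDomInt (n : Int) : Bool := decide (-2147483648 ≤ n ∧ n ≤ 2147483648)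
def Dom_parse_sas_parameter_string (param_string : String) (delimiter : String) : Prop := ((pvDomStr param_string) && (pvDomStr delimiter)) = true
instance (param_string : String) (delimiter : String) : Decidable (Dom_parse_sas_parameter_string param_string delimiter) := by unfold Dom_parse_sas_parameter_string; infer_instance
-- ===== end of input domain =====

-- B parses by repeated str.partition (peeling pieces off the front, and consuming each
-- item key-by-key with an early break) instead of A's split-everything plus '|'-branch
-- plus five length checks (objective: alternative).


-- ===== PORT A =====
-- s.split(sep) for a NONEMPTY literal separator ('|'); the delimiter split, whose
-- separator may be empty (ValueError), is ported with PySem.Str.split? instead.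
def pySplit (s sep : String) : List String :=
  (PySem.Chars.splitOn s.toList sep.toList).map String.ofList

def parse_sas_parameter_string (param_string : String) (delimiter : String) : List (List (String × String)) :=
  if param_string = "" then []
  else
    match PySem.Str.split? param_string delimiter with
    | none => []  -- Python raises ValueError here (empty separator); excluded by Pre_
    | some items =>
      items.foldl (fun components item =>
        if PySem.Str.isIn "|" item then
          let parts := pySplit item "|"
          let component : PySem.Dict String String := ⟨[]⟩
          let component := if parts.length ≥ 1 then component.insert "value" (parts.getD 0 "") else component
          let component := if parts.length ≥ 2 then component.insert "color" (parts.getD 1 "") else component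
          let component := if parts.length ≥ 3 then component.insert "symbol" (parts.getD 2 "") else component
          let component := if parts.length ≥ 4 then component.insert "line" (parts.getD 3 "") else component
          let component := if parts.length ≥ 5 then component.insert "position" (parts.getD 4 "") else component
          components ++ [component.items]
        else
          components ++ [[("value", item)]]) []

-- ===== PORT B =====
-- s.partition(sep): first occurrence via find, exact for nonempty sep (the empty-sep
-- ValueError case is guarded before every call below).
def pyPartition (s sep : List Char) : List Char × List Char × List Char :=
  let i := PySem.Chars.find s sep
  if i = -1 then (s, [], [])
  else (s.take i.toNat, sep, s.drop (i.toNat + sep.length))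

-- the `while True` loop of Source B's _items
def altItems (s sep : List Char) (out : List (List Char)) : List (List Char) :=
  match hp : pyPartition s sep with
  | (head, found, tail) =>
    if found = [] then out ++ [head]
    else altItems tail sep (out ++ [head])
termination_by s.length
decreasing_by
  rename_i h
  by_cases hfind : PySem.Chars.find s sep = -1
  · simp [pyPartition, hfind] at hp
    exact absurd hp.2.1 h
  · simp only [pyPartition, hfind, if_false, Prod.mk.injEq] at hp
    obtain ⟨hh, hf, ht⟩ := hp
    subst ht
    have hsep : sep ≠ [] := fun he => h (by rw [← hf, he])
    have hnn : 0 ≤ PySem.Chars.find s sep := by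
      have := PySem.Chars.neg_one_le_find s sep; omega
    have hinf : sep <:+: s := (PySem.Chars.find_nonneg_iff s sep).mp hnn
    have hslen : 0 < s.length := by
      cases s with
      | nil => exact absurd (List.eq_nil_of_infix_nil hinf) hsep
      | cons a t => simp
    have hsl : 0 < sep.length := List.length_pos_iff.mpr hsep
    simp only [List.length_drop]
    omega

-- the key loop with break of Source B's _component
def altComponent (keys : List String) (item : List Char) (comp : PySem.Dict String String) : PySem.Dict String String :=
  match keys with
  | [] => comp
  | k :: ks =>
    let p := pyPartition item ['|']
    let comp := comp.insert k (String.ofList p.1)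
    if p.2.1 = [] then comp else altComponent ks p.2.2 comp

def pvKeys : List String := ["value", "color", "symbol", "line", "position"]

def parse_sas_parameter_string_alt (param_string : String) (delimiter : String) : List (List (String × String)) :=
  if param_string = "" then []
  else if delimiter = "" then []  -- Python raises ValueError here (empty separator); excluded by Pre_
  else (altItems param_string.toList delimiter.toList []).map
        (fun item => (altComponent pvKeys item ⟨[]⟩).items)

-- ===== PRECONDITION & SPEC =====
-- Pre_ excludes only the inputs where Python A raises ValueError: a nonempty
-- param_string together with an empty delimiter (split with empty separator raises).
def Pre_parse_sas_parameter_string (param_string : String) (delimiter : String) : Prop :=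
  param_string = "" ∨ delimiter ≠ ""
instance (param_string : String) (delimiter : String) : Decidable (Pre_parse_sas_parameter_string param_string delimiter) := by unfold Pre_parse_sas_parameter_string; infer_instance

def pvWitness_parse_sas_parameter_string : String × String := ("a|red|dot~b", "~")

def Spec_parse_sas_parameter_string (param_string : String) (delimiter : String) (out : List (List (String × String))) : Prop := out = parse_sas_parameter_string_alt param_string delimiter
instance (param_string : String) (delimiter : String) (out : List (List (String × String))) : Decidable (Spec_parse_sas_parameter_string param_string delimiter out) := by unfold Spec_parse_sas_parameter_string; infer_instance

-- ===== CLAIM (what is proved, stated in full; the proofs are below) =====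
def Claim_equal_parse_sas_parameter_string : Prop := ∀ (param_string : String) (delimiter : String), Dom_parse_sas_parameter_string param_string delimiter → Pre_parse_sas_parameter_string param_string delimiter → Spec_parse_sas_parameter_string param_string delimiter (parse_sas_parameter_string param_string delimiter)

-- ===== LEMMAS AND PROOFS =====

-- find with an offset: the offset just shifts a non-(-1) result.
lemma find_go_shift (sep : List Char) :
    ∀ (s : List Char) (k : Nat), PySem.Chars.find.go sep s k =
      if PySem.Chars.find.go sep s 0 = -1 then -1 else PySem.Chars.find.go sep s 0 + k := by
  intro s
  induction s with
  | nil =>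
    intro k
    by_cases h : sep.isEmpty <;> simp [PySem.Chars.find.go, h]
  | cons c rest ih =>
    intro k
    by_cases h : sep.isPrefixOf (c :: rest)
    · simp [PySem.Chars.find.go, h]
    · rw [PySem.Chars.find.go, PySem.Chars.find.go]
      simp only [h]
      rw [ih (k + 1), ih 1]
      have hge : (-1:Int) ≤ PySem.Chars.find.go sep rest 0 := PySem.Chars.neg_one_le_find rest sep
      by_cases h0 : PySem.Chars.find.go sep rest 0 = -1 <;>
        simp only [h0, if_true, if_false] <;> push_cast <;> split_ifs <;> omega

lemma find_cons_of_not_prefix (sep : List Char) (c : Char) (rest : List Char)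
    (h : ¬ sep.isPrefixOf (c :: rest) = true) (hinf : sep <:+: rest) :
    PySem.Chars.find (c :: rest) sep = PySem.Chars.find rest sep + 1 := by
  rw [PySem.Chars.find, PySem.Chars.find.go]
  simp only [h]
  rw [find_go_shift]
  have hnn : ¬ PySem.Chars.find.go sep rest 0 = -1 := by
    have := (PySem.Chars.find_nonneg_iff rest sep).mpr hinf
    rw [PySem.Chars.find] at this; omega
  simp only [hnn, if_false]
  rw [PySem.Chars.find]
  push_cast
  ring

lemma find_zero_of_prefix (sep s : List Char) (h : sep.isPrefixOf s = true) :
    PySem.Chars.find s sep = 0 := by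
  cases s with
  | nil =>
    have : sep = [] := by
      simpa using List.isPrefixOf_iff_prefix.mp h
    simp [PySem.Chars.find, PySem.Chars.find.go, this]
  | cons c rest => simp [PySem.Chars.find, PySem.Chars.find.go, h]

-- splitOn.go: fuel does not matter once it exceeds the string length (sep nonempty).
lemma splitOn_go_fuel (sep : List Char) (hsep : sep ≠ []) :
    ∀ (f1 : Nat) (f2 : Nat) (s cur : List Char) (acc : List (List Char)),
      s.length < f1 → s.length < f2 →
      PySem.Chars.splitOn.go sep f1 s cur acc = PySem.Chars.splitOn.go sep f2 s cur acc := by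
  intro f1
  induction f1 with
  | zero => intro f2 s cur acc h1 _; omega
  | succ n ih =>
    intro f2 s cur acc h1 h2
    cases s with
    | nil =>
      cases f2 with
      | zero => omega
      | succ m => simp [PySem.Chars.splitOn.go]
    | cons c rest =>
      cases f2 with
      | zero => omega
      | succ m =>
        rw [PySem.Chars.splitOn.go, PySem.Chars.splitOn.go]
        by_cases h : sep.isPrefixOf (c :: rest)
        · simp only [h, if_true]
          have hsl : 0 < sep.length := List.length_pos_iff.mpr hsep
          have hl1 : rest.length + 1 < n + 1 := by simpa using h1
          have hl2 : rest.length + 1 < m + 1 := by simpa using h2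
          apply ih
          · simp only [List.length_drop, List.length_cons]; omega
          · simp only [List.length_drop, List.length_cons]; omega
        · simp only [h, if_false]
          have hl1 : rest.length + 1 < n + 1 := by simpa using h1
          have hl2 : rest.length + 1 < m + 1 := by simpa using h2
          apply ih
          · omega
          · omega

-- splitOn.go: the accumulator is just prepended (reversed) to the result.
lemma splitOn_go_acc (sep : List Char) :
    ∀ (fuel : Nat) (s cur : List Char) (acc : List (List Char)),
      PySem.Chars.splitOn.go sep fuel s cur acc =
        acc.reverse ++ PySem.Chars.splitOn.go sep fuel s cur [] := by
  intro fuel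
  induction fuel with
  | zero => intro s cur acc; simp [PySem.Chars.splitOn.go]
  | succ n ih =>
    intro s cur acc
    cases s with
    | nil => simp [PySem.Chars.splitOn.go]
    | cons c rest =>
      rw [PySem.Chars.splitOn.go, PySem.Chars.splitOn.go]
      by_cases h : sep.isPrefixOf (c :: rest)
      · simp only [h, if_true]
        rw [ih (List.drop sep.length (c :: rest)) [] (cur.reverse :: acc),
            ih (List.drop sep.length (c :: rest)) [] (cur.reverse :: [])]
        simp
      · simp only [h, if_false]
        rw [ih rest (c :: cur) acc, ih rest (c :: cur) []]
        simp

-- When sep occurs nowhere in s, splitOn returns [s] (any fuel).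
lemma splitOn_go_of_not_infix (sep : List Char) (fuel : Nat) :
    ∀ (s cur : List Char) (acc : List (List Char)), ¬ sep <:+: s →
      PySem.Chars.splitOn.go sep fuel s cur acc = ((cur.reverse ++ s) :: acc).reverse := by
  induction fuel with
  | zero => intro s cur acc _; simp [PySem.Chars.splitOn.go]
  | succ n ih =>
    intro s cur acc h
    cases s with
    | nil => simp [PySem.Chars.splitOn.go]
    | cons c rest =>
      have hpre : ¬ sep <+: (c :: rest) := fun hp => h hp.isInfix
      rw [PySem.Chars.splitOn.go]
      simp only [List.isPrefixOf_iff_prefix, hpre, if_false]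
      rw [ih rest (c :: cur) acc (fun hi => h (hi.trans (List.suffix_cons c rest).isInfix))]
      simp

lemma splitOn_of_not_infix (s sep : List Char) (h : ¬ sep <:+: s) :
    PySem.Chars.splitOn s sep = [s] := by
  rw [PySem.Chars.splitOn, splitOn_go_of_not_infix sep _ s [] [] h]; simp

-- splitOn through the first occurrence of sep: head piece, then splitOn of the rest.
lemma splitOn_go_found (sep : List Char) (hsep : sep ≠ []) :
    ∀ (fuel : Nat) (s cur : List Char) (acc : List (List Char)),
      s.length < fuel → sep <:+: s →
      PySem.Chars.splitOn.go sep fuel s cur acc =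
        acc.reverse ++ [cur.reverse ++ s.take (PySem.Chars.find s sep).toNat] ++
          PySem.Chars.splitOn (s.drop ((PySem.Chars.find s sep).toNat + sep.length)) sep := by
  intro fuel
  induction fuel with
  | zero => intro s cur acc h _; omega
  | succ n ih =>
    intro s cur acc hlen hinf
    cases s with
    | nil => exact absurd (List.eq_nil_of_infix_nil hinf) hsep
    | cons c rest =>
      rw [PySem.Chars.splitOn.go]
      by_cases h : sep.isPrefixOf (c :: rest)
      · simp only [h, if_true]
        have hf : PySem.Chars.find (c :: rest) sep = 0 := find_zero_of_prefix sep _ h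
        have hsl : 0 < sep.length := List.length_pos_iff.mpr hsep
        have hdl : (List.drop sep.length (c :: rest)).length < n := by
          simp only [List.length_drop, List.length_cons]
          simp at hlen; omega
        rw [splitOn_go_acc, splitOn_go_fuel sep hsep n
            ((List.drop sep.length (c :: rest)).length + 1) _ [] [] hdl (by omega)]
        rw [← PySem.Chars.splitOn]
        simp [hf]
      · simp only [h, if_false]
        have hinfr : sep <:+: rest := by
          rcases List.infix_cons_iff.mp hinf with hp | hr
          · exact absurd (List.isPrefixOf_iff_prefix.mpr hp) h
          · exact hr
        have hf := find_cons_of_not_prefix sep c rest h hinfr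
        have hnn := (PySem.Chars.find_nonneg_iff rest sep).mpr hinfr
        rw [ih rest (c :: cur) acc (by simp at hlen ⊢; omega) hinfr]
        have ht : (PySem.Chars.find (c :: rest) sep).toNat
            = (PySem.Chars.find rest sep).toNat + 1 := by omega
        rw [hf] at ht ⊢
        simp only [ht]
        have harith : (PySem.Chars.find rest sep).toNat + 1 + sep.length
            = ((PySem.Chars.find rest sep).toNat + sep.length) + 1 := by omega
        simp only [List.take_succ_cons, harith, List.drop_succ_cons]
        simp

lemma splitOn_found (s sep : List Char) (hsep : sep ≠ []) (hinf : sep <:+: s) :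
    PySem.Chars.splitOn s sep =
      s.take (PySem.Chars.find s sep).toNat ::
        PySem.Chars.splitOn (s.drop ((PySem.Chars.find s sep).toNat + sep.length)) sep := by
  rw [PySem.Chars.splitOn, splitOn_go_found sep hsep _ s [] [] (by omega) hinf]
  simp

-- B's partition loop produces exactly splitOn (fuel = an upper bound on the length).
lemma altItems_eq (sep : List Char) (hsep : sep ≠ []) :
    ∀ (n : Nat) (s : List Char), s.length ≤ n →
      ∀ (out : List (List Char)), altItems s sep out = out ++ PySem.Chars.splitOn s sep := by
  intro n
  induction n with
  | zero =>
    intro s hlen out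
    have hs : s = [] := List.length_eq_zero_iff.mp (by omega)
    subst hs
    have hni : ¬ sep <:+: [] := fun hi => hsep (List.eq_nil_of_infix_nil hi)
    have hfind : PySem.Chars.find [] sep = -1 := (PySem.Chars.find_eq_neg_one_iff [] sep).mpr hni
    rw [altItems]
    simp [pyPartition, hfind, splitOn_of_not_infix [] sep hni]
  | succ m ih =>
    intro s hlen out
    rw [altItems]
    by_cases hfind : PySem.Chars.find s sep = -1
    · have hni : ¬ sep <:+: s := (PySem.Chars.find_eq_neg_one_iff s sep).mp hfind
      simp [pyPartition, hfind, splitOn_of_not_infix s sep hni]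
    · have hnn : 0 ≤ PySem.Chars.find s sep := by
        have := PySem.Chars.neg_one_le_find s sep; omega
      have hinf : sep <:+: s := (PySem.Chars.find_nonneg_iff s sep).mp hnn
      have hslen : 0 < s.length := by
        cases s with
        | nil => exact absurd (List.eq_nil_of_infix_nil hinf) hsep
        | cons a t => simp
      have hsl : 0 < sep.length := List.length_pos_iff.mpr hsep
      simp only [pyPartition, hfind, if_false]
      rw [if_neg hsep]
      rw [ih (s.drop ((PySem.Chars.find s sep).toNat + sep.length))
            (by simp only [List.length_drop]; omega)]
      rw [splitOn_found s sep hsep hinf]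
      simp

-- B's key loop: its dict items are the zip of the keys with the '|'-pieces.
lemma altComponent_items :
    ∀ (keys : List String) (item : List Char) (d : PySem.Dict String String),
      keys.Nodup → (∀ k ∈ keys, d.contains k = false) →
      (altComponent keys item d).items =
        d.items ++ keys.zip ((PySem.Chars.splitOn item ['|']).map String.ofList) := by
  intro keys
  induction keys with
  | nil => intro item d _ _; simp [altComponent]
  | cons k ks ih =>
    intro item d hnd hfresh
    rw [altComponent]
    simp only [pyPartition]
    have hdk : d.contains k = false := hfresh k (by simp)
    by_cases hfind : PySem.Chars.find item ['|'] = -1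
    · have hni : ¬ ['|'] <:+: item := (PySem.Chars.find_eq_neg_one_iff item ['|']).mp hfind
      simp only [hfind, if_true]
      simp [PySem.Dict.insert, hdk, splitOn_of_not_infix item ['|'] hni]
    · have hnn : 0 ≤ PySem.Chars.find item ['|'] := by
        have := PySem.Chars.neg_one_le_find item ['|']; omega
      have hinf : ['|'] <:+: item := (PySem.Chars.find_nonneg_iff item ['|']).mp hnn
      simp only [hfind, if_false]
      have hins : (d.insert k (String.ofList (item.take (PySem.Chars.find item ['|']).toNat))).items
          = d.items ++ [(k, String.ofList (item.take (PySem.Chars.find item ['|']).toNat))] := by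
        simp [PySem.Dict.insert, hdk]
      have hfresh' : ∀ k' ∈ ks, (d.insert k (String.ofList
          (item.take (PySem.Chars.find item ['|']).toNat))).contains k' = false := by
        intro k' hk'
        have hne : (k == k') = false := beq_eq_false_iff_ne.mpr
          (fun he => (List.nodup_cons.mp hnd).1 (he ▸ hk'))
        have hdk' : d.contains k' = false := hfresh k' (List.mem_cons_of_mem _ hk')
        simp only [PySem.Dict.contains] at hdk' ⊢
        rw [hins]
        simp [hdk', hne]
      rw [if_neg (show ¬ (['|'] : List Char) = [] by simp)]
      rw [ih _ _ (List.nodup_cons.mp hnd).2 hfresh']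
      rw [hins]
      rw [splitOn_found item ['|'] (by simp) hinf]
      simp

-- A's length-check cascade builds exactly the zip of the fixed key list with the parts.
lemma cascade_eq_zip (parts : List String) :
    (let component : PySem.Dict String String := ⟨[]⟩
     let component := if parts.length ≥ 1 then component.insert "value" (parts.getD 0 "") else component
     let component := if parts.length ≥ 2 then component.insert "color" (parts.getD 1 "") else component
     let component := if parts.length ≥ 3 then component.insert "symbol" (parts.getD 2 "") else component
     let component := if parts.length ≥ 4 then component.insert "line" (parts.getD 3 "") else component
     let component := if parts.length ≥ 5 then component.insert "position" (parts.getD 4 "") else component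
     component.items) = pvKeys.zip parts := by
  match parts with
  | [] => simp [pvKeys]
  | [a] => simp [pvKeys, PySem.Dict.insert, PySem.Dict.contains]
  | [a, b] => simp [pvKeys, PySem.Dict.insert, PySem.Dict.contains]
  | [a, b, c] => simp [pvKeys, PySem.Dict.insert, PySem.Dict.contains]
  | [a, b, c, d] => simp [pvKeys, PySem.Dict.insert, PySem.Dict.contains]
  | a :: b :: c :: d :: e :: rest =>
    simp [pvKeys, PySem.Dict.insert, PySem.Dict.contains]

lemma pySplit_of_not_isIn (item : String) (h : PySem.Str.isIn "|" item = false) :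
    pySplit item "|" = [item] := by
  have hinf : ¬ ("|".toList <:+: item.toList) := by
    have := PySem.Chars.isIn_eq_false_iff (sub := "|".toList) (s := item.toList)
    simp only [PySem.Str.isIn] at h
    exact this.mp h
  rw [pySplit, splitOn_of_not_infix _ _ hinf]
  simp [String.ofList_toList]

-- per-item: A's loop body equals appending the zip component.
lemma body_eq (acc : List (List (String × String))) (item : String) :
    (if PySem.Str.isIn "|" item then
       (let parts := pySplit item "|"
        let component : PySem.Dict String String := ⟨[]⟩
        let component := if parts.length ≥ 1 then component.insert "value" (parts.getD 0 "") else component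
        let component := if parts.length ≥ 2 then component.insert "color" (parts.getD 1 "") else component
        let component := if parts.length ≥ 3 then component.insert "symbol" (parts.getD 2 "") else component
        let component := if parts.length ≥ 4 then component.insert "line" (parts.getD 3 "") else component
        let component := if parts.length ≥ 5 then component.insert "position" (parts.getD 4 "") else component
        acc ++ [component.items])
     else acc ++ [[("value", item)]]) = acc ++ [pvKeys.zip (pySplit item "|")] := by
  by_cases h : PySem.Str.isIn "|" item = true
  · simp only [h, if_true]
    rw [← cascade_eq_zip (pySplit item "|")]
  · have h' : PySem.Str.isIn "|" item = false := by simpa using h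
    rw [pySplit_of_not_isIn item h']
    simp only [h', Bool.false_eq_true, if_false, pvKeys]
    simp

-- per item, B's component equals the zip component of A's analysis.
lemma component_pointwise (cs : List Char) :
    (altComponent pvKeys cs ⟨[]⟩).items = pvKeys.zip (pySplit (String.ofList cs) "|") := by
  rw [altComponent_items pvKeys cs ⟨[]⟩ (by decide) (fun _ _ => by simp [PySem.Dict.contains])]
  rw [pySplit]
  simp [String.toList_ofList]

-- ===== VERDICT (by name: the statement is the Claim_ definition above) =====
theorem parse_sas_parameter_string_spec : Claim_equal_parse_sas_parameter_string := by
  intro p d _ hpre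
  unfold Spec_parse_sas_parameter_string parse_sas_parameter_string parse_sas_parameter_string_alt
  by_cases hp : p = ""
  · simp [hp]
  · simp only [hp, if_false]
    have hd : d ≠ "" := by
      rcases hpre with h | h
      · exact absurd h hp
      · exact h
    have hdl : d.toList ≠ [] := by simpa using hd
    rw [if_neg hd]
    have hsplit : PySem.Str.split? p d
        = some ((PySem.Chars.splitOn p.toList d.toList).map String.ofList) := by
      simp [PySem.Str.split?, PySem.Chars.split?, List.isEmpty_iff, hdl]
    rw [hsplit]
    rw [altItems_eq d.toList hdl p.toList.length p.toList le_rfl []]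
    simp only [List.nil_append]
    rw [List.map_congr_left (fun cs _ => component_pointwise cs)]
    rw [show (fun cs => pvKeys.zip (pySplit (String.ofList cs) "|"))
          = (fun item => pvKeys.zip (pySplit item "|")) ∘ String.ofList from rfl]
    rw [← List.map_map]
    generalize (List.map String.ofList (PySem.Chars.splitOn p.toList d.toList)) = items
    show List.foldl _ [] items = _
    induction items using List.reverseRecOn with
    | nil => rfl
    | append_singleton xs x ih2 =>
      rw [List.foldl_append, List.map_append, ← ih2]
      simp only [List.foldl_cons, List.foldl_nil, List.map_cons, List.map_nil]
      exact body_eq _ x
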